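-- pv_equiv track=rewrite | github.com/lamoglia/fmri-preprocessing-pipeline-and-classifier | classifier/src/utils.py | get_coordinates_on_correlation_matrix_from_upper_tri_array_index
-- ===== SOURCE A (Python) =====
-- def get_coordinates_on_correlation_matrix_from_upper_tri_array_index(upper_tri_index, matrix_size):
--     x = 0
--     y = 0
--     for i in range(matrix_size):
--         for j in range(matrix_size):
--             if i < j:
--                 if upper_tri_index == 0:
--                     x = i
--                     y = j
--                     return x, y
--                 upper_tri_index -= 1
--     return x, y
-- ===== SOURCE B (Python) =====
-- def get_coordinates_on_correlation_matrix_from_upper_tri_array_index(upper_tri_index, matrix_size):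
--     if upper_tri_index < 0:
--         return 0, 0
--     k = upper_tri_index
--     for i in range(matrix_size - 1):
--         row = matrix_size - 1 - i  # number of upper-triangle cells in row i
--         if k < row:
--             return i, i + 1 + k
--         k -= row
--     return 0, 0
-- ===== Notes on version B (the rewrite author's own statement) =====
-- stated objective: faster
-- what changed: Replaces the O(n^2) per-cell nested scan with a single pass over rows that subtracts each row's upper-triangle length (n-1-i) from the index until it falls inside a row, after an explicit negative-index guard.
import Mathlib
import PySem

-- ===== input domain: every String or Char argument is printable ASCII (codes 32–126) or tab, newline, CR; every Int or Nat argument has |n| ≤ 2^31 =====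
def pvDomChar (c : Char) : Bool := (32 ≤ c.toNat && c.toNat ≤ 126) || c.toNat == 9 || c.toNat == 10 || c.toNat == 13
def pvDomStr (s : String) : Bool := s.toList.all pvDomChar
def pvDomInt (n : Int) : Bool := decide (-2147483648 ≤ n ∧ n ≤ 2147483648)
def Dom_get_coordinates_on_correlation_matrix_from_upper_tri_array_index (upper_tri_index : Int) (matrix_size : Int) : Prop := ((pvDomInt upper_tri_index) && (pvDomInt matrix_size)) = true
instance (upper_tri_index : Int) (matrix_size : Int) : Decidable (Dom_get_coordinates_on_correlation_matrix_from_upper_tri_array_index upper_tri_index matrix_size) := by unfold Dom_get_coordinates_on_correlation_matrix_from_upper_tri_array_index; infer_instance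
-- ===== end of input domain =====

-- ===== PORT A =====
-- B is a single pass over rows (subtracting row lengths) instead of A's per-cell nested scan; asymptotically faster.
-- inner 'for j in range(matrix_size)' of A, with the early 'return x, y' as .error
def pvAInner (i : Int) : Int → List Int → Except (Int × Int) Int
  | k, [] => .ok k
  | k, j :: rest =>
    if i < j then
      (if k = 0 then .error (i, j) else pvAInner i (k - 1) rest)
    else pvAInner i k rest

-- outer 'for i in range(matrix_size)' of A; falls through to the initial (x, y) = (0, 0)
def pvAOuter (n : Int) : Int → List Int → List Int
  | _, [] => [0, 0]
  | k, i :: rest =>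
    match pvAInner i k (PySem.List.pyRange 0 n 1) with
    | .error (x, y) => [x, y]
    | .ok k' => pvAOuter n k' rest

def get_coordinates_on_correlation_matrix_from_upper_tri_array_index (upper_tri_index : Int) (matrix_size : Int) : List Int :=
  pvAOuter matrix_size upper_tri_index (PySem.List.pyRange 0 matrix_size 1)

-- ===== PORT B =====
-- B's 'for i in range(matrix_size - 1)' loop, returning early when k falls inside row i
def pvBGo (n : Int) : Int → List Int → List Int
  | _, [] => [0, 0]
  | k, i :: rest =>
    let row := n - 1 - i
    if k < row then [i, i + 1 + k] else pvBGo n (k - row) rest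

def get_coordinates_on_correlation_matrix_from_upper_tri_array_index_alt (upper_tri_index : Int) (matrix_size : Int) : List Int :=
  if upper_tri_index < 0 then [0, 0]
  else pvBGo matrix_size upper_tri_index (PySem.List.pyRange 0 (matrix_size - 1) 1)

-- ===== PRECONDITION & SPEC =====
def Spec_get_coordinates_on_correlation_matrix_from_upper_tri_array_index (upper_tri_index : Int) (matrix_size : Int) (out : List Int) : Prop := out = get_coordinates_on_correlation_matrix_from_upper_tri_array_index_alt upper_tri_index matrix_size
instance (upper_tri_index : Int) (matrix_size : Int) (out : List Int) : Decidable (Spec_get_coordinates_on_correlation_matrix_from_upper_tri_array_index upper_tri_index matrix_size out) := by unfold Spec_get_coordinates_on_correlation_matrix_from_upper_tri_array_index; infer_instance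

-- ===== CLAIM (what is proved, stated in full; the proofs are below) =====
def Claim_equal_get_coordinates_on_correlation_matrix_from_upper_tri_array_index : Prop := ∀ (upper_tri_index : Int) (matrix_size : Int), Dom_get_coordinates_on_correlation_matrix_from_upper_tri_array_index upper_tri_index matrix_size → Spec_get_coordinates_on_correlation_matrix_from_upper_tri_array_index upper_tri_index matrix_size (get_coordinates_on_correlation_matrix_from_upper_tri_array_index upper_tri_index matrix_size)

-- ===== LEMMAS AND PROOFS =====

theorem pvAInner_append (i k : Int) (L M : List Int) :
    pvAInner i k (L ++ M) =
      match pvAInner i k L with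
      | .error r => .error r
      | .ok k' => pvAInner i k' M := by
  induction L generalizing k with
  | nil => simp [pvAInner]
  | cons j rest ih =>
    simp only [List.cons_append, pvAInner]
    split_ifs <;> simp [ih]

theorem pvAInner_skip (i k : Int) (L : List Int) (h : ∀ j ∈ L, j ≤ i) :
    pvAInner i k L = .ok k := by
  induction L generalizing k with
  | nil => rfl
  | cons j rest ih =>
    have hj : j ≤ i := h j (by simp)
    simp only [pvAInner, if_neg (not_lt.mpr hj)]
    exact ih k (fun x hx => h x (by simp [hx]))

theorem pvAInner_err (i : Int) : ∀ (m : Nat) (a b k : Int), (b - a).toNat = m →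
    i < a → 0 ≤ k → k < b - a →
    pvAInner i k (PySem.List.pyRange a b 1) = .error (i, a + k) := by
  intro m
  induction m with
  | zero => intro a b k hd _ hk0 hkb; omega
  | succ m ih =>
    intro a b k hd hia hk0 hkb
    have hab : a < b := by omega
    rw [PySem.List.pyRange_one_cons hab]
    simp only [pvAInner, if_pos hia]
    by_cases hk : k = 0
    · subst hk; simp
    · rw [if_neg hk]
      have h2 : a + k = (a + 1) + (k - 1) := by omega
      rw [h2]
      exact ih (a + 1) b (k - 1) (by omega) (by omega) (by omega) (by omega)

theorem pvAInner_ok (i : Int) : ∀ (m : Nat) (a b k : Int), (b - a).toNat = m →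
    i < a → (k < 0 ∨ b - a ≤ k) →
    pvAInner i k (PySem.List.pyRange a b 1) = .ok (k - max (b - a) 0) := by
  intro m
  induction m with
  | zero =>
    intro a b k hd _ _
    rw [PySem.List.pyRange_one_eq_nil (by omega)]
    simp only [pvAInner]
    congr 1
    omega
  | succ m ih =>
    intro a b k hd hia hk
    have hab : a < b := by omega
    rw [PySem.List.pyRange_one_cons hab]
    simp only [pvAInner, if_pos hia]
    rw [if_neg (by omega : ¬ k = 0)]
    have h2 : k - max (b - a) 0 = (k - 1) - max (b - (a + 1)) 0 := by omega
    rw [h2]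
    exact ih (a + 1) b (k - 1) (by omega) (by omega) (by omega)

theorem pvAInner_full_err (i n k : Int) (hi0 : 0 ≤ i) (hin : i < n)
    (hk0 : 0 ≤ k) (hk : k < n - 1 - i) :
    pvAInner i k (PySem.List.pyRange 0 n 1) = .error (i, i + 1 + k) := by
  rw [PySem.List.pyRange_one_append 0 (i + 1) n (by omega) (by omega),
      pvAInner_append,
      pvAInner_skip i k _ (fun j hj => by
        have := (PySem.List.mem_pyRange_one).mp hj; omega)]
  simp only
  have h2 : i + 1 + k = (i + 1) + k := by omega
  rw [h2]
  exact pvAInner_err i (n - (i + 1)).toNat (i + 1) n k rfl (by omega) hk0 (by omega)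

theorem pvAInner_full_ok (i n k : Int) (hi0 : 0 ≤ i) (hin : i < n)
    (hk : k < 0 ∨ n - 1 - i ≤ k) :
    pvAInner i k (PySem.List.pyRange 0 n 1) = .ok (k - (n - 1 - i)) := by
  rw [PySem.List.pyRange_one_append 0 (i + 1) n (by omega) (by omega),
      pvAInner_append,
      pvAInner_skip i k _ (fun j hj => by
        have := (PySem.List.mem_pyRange_one).mp hj; omega)]
  simp only
  have h2 : k - (n - 1 - i) = k - max (n - (i + 1)) 0 := by omega
  rw [h2]
  exact pvAInner_ok i (n - (i + 1)).toNat (i + 1) n k rfl (by omega) (by omega)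

theorem pvAOuter_neg (n : Int) (rs : List Int) : ∀ (k : Int), k < 0 →
    (∀ i ∈ rs, 0 ≤ i ∧ i < n) → pvAOuter n k rs = [0, 0] := by
  induction rs with
  | nil => intro k _ _; rfl
  | cons i rest ih =>
    intro k hk h
    obtain ⟨h0, h1⟩ := h i (by simp)
    simp only [pvAOuter]
    rw [pvAInner_full_ok i n k h0 h1 (Or.inl hk)]
    exact ih (k - (n - 1 - i)) (by omega) (fun x hx => h x (by simp [hx]))

theorem pvAOuter_eq_go (n : Int) : ∀ (m : Nat) (r k : Int), (n - r).toNat = m →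
    0 ≤ r → 0 ≤ k →
    pvAOuter n k (PySem.List.pyRange r n 1) =
      pvBGo n k (PySem.List.pyRange r (n - 1) 1) := by
  intro m
  induction m with
  | zero =>
    intro r k hd _ _
    rw [PySem.List.pyRange_one_eq_nil (by omega),
        PySem.List.pyRange_one_eq_nil (by omega)]
    rfl
  | succ m ih =>
    intro r k hd hr hk
    have hrn : r < n := by omega
    rw [PySem.List.pyRange_one_cons hrn]
    simp only [pvAOuter]
    by_cases hlt : k < n - 1 - r
    · rw [pvAInner_full_err r n k hr hrn hk hlt]
      rw [PySem.List.pyRange_one_cons (by omega : r < n - 1)]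
      simp [pvBGo, hlt]
    · rw [pvAInner_full_ok r n k hr hrn (Or.inr (by omega))]
      simp only
      rw [ih (r + 1) (k - (n - 1 - r)) (by omega) (by omega) (by omega)]
      by_cases hr1 : r < n - 1
      · rw [PySem.List.pyRange_one_cons hr1]
        simp [pvBGo, hlt]
      · rw [PySem.List.pyRange_one_eq_nil (by omega : n - 1 ≤ r),
            PySem.List.pyRange_one_eq_nil (by omega : n - 1 ≤ r + 1)]
        rfl

-- ===== VERDICT (by name: the statement is the Claim_ definition above) =====
theorem get_coordinates_on_correlation_matrix_from_upper_tri_array_index_spec : Claim_equal_get_coordinates_on_correlation_matrix_from_upper_tri_array_index := by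
  intro k n _
  unfold Spec_get_coordinates_on_correlation_matrix_from_upper_tri_array_index
  unfold get_coordinates_on_correlation_matrix_from_upper_tri_array_index
  unfold get_coordinates_on_correlation_matrix_from_upper_tri_array_index_alt
  by_cases hk : k < 0
  · rw [if_pos hk]
    exact pvAOuter_neg n _ k hk (fun i hi => by
      have := (PySem.List.mem_pyRange_one).mp hi; omega)
  · rw [if_neg hk]
    exact pvAOuter_eq_go n (n - 0).toNat 0 k rfl le_rfl (by omega)
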